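-- pv_equiv track=rewrite | github.com/YueShi12/VaccineScheduling | Online/helperfunctions.py | findFreeSlotsWithGap
-- ===== SOURCE A (Python) =====
-- def checkFreeSlots(location, start, end):
--     #assume all slots are free
--     slotsFree = True
--     #start checking if all slots are free
--     for i in range(start, end + 1):
--         #if a slot is not free, slotsFree will be set to false
--         slotsFree &= not(bool(location & (1 << i)))
--     return slotsFree
--
-- def findFreeSlotsWithGap(locations, startI, endI, p):
--     slots = []
--     for i in range(len(locations)):
--         #create a variable to keep track of the last filled slot
--         #scan from the start of the interval backwards to find the initial lastFilledSlot, default to -1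
--         lastFilledSlot = -1
--         for n in range(startI, -1, -1):
--             if not(checkFreeSlots(locations[i], n, n)):
--                 lastFilledSlot = n
--                 break
--
--         #create a variable to check if the previous slot is free, set it accordingly
--         previousSlotsFree = (lastFilledSlot != startI - 1)
--         #start at the beginning of the interval, only checking options that do not exceed the interval
--         for j in range(startI, (endI - (p-1)) + 1):
--             currentSlotsFree = checkFreeSlots(locations[i], j, j + (p-1))
--             #if the previous slot was not free, but the current slot is, update the lastFilledSlot
--             if not(previousSlotsFree) and currentSlotsFree:
--                 lastFilledSlot = j - 1
--             if currentSlotsFree: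
--                 slots.append((i,j, j - lastFilledSlot - 1 ))
--             previousSlotsFree = currentSlotsFree
--     return slots
-- ===== SOURCE B (Python) =====
-- def findFreeSlotsWithGap(locations, startI, endI, p):
--     # Prefix sums of filled bits give an O(1) window-empty test; a running
--     # "last filled slot" index replaces A's repeated per-window bit scans.
--     slots = []
--     lastJ = endI - p + 1
--     for i, loc in enumerate(locations):
--         if startI > lastJ:
--             continue
--         # prefix[k] = number of filled slots among indices 0..k-1
--         prefix = [0]
--         acc = 0
--         for k in range(endI + 1):
--             if loc & (1 << k):
--                 acc += 1
--             prefix.append(acc)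
--         # nearest filled slot strictly below startI (or -1)
--         last = -1
--         for k in range(0, startI):
--             if loc & (1 << k):
--                 last = k
--         for j in range(startI, lastJ + 1):
--             if j > startI and loc & (1 << (j - 1)):
--                 last = j - 1
--             if prefix[j + p] - prefix[j] == 0:
--                 slots.append((i, j, j - last - 1))
--     return slots
-- ===== Notes on version B (the rewrite author's own statement) =====
-- stated objective: faster
-- what changed: B replaces A's per-window rescan of all p bits (plus a backward prescan per location) by a prefix-sum array of filled bits giving an O(1) window-empty test and a running nearest-previous-filled index updated one bit per step.
-- outside the precondition, e.g. on findFreeSlotsWithGap([1], 0, 0, 0): A returns [(0, 0, -1), (0, 1, 0)], B returns [(0, 0, 0), (0, 1, 0)]; on findFreeSlotsWithGap([0], 0, -1, -2): A returns [(0, 0, 0), (0, 1, 1), (0, 2, 2)], B raises IndexError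
import Mathlib
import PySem

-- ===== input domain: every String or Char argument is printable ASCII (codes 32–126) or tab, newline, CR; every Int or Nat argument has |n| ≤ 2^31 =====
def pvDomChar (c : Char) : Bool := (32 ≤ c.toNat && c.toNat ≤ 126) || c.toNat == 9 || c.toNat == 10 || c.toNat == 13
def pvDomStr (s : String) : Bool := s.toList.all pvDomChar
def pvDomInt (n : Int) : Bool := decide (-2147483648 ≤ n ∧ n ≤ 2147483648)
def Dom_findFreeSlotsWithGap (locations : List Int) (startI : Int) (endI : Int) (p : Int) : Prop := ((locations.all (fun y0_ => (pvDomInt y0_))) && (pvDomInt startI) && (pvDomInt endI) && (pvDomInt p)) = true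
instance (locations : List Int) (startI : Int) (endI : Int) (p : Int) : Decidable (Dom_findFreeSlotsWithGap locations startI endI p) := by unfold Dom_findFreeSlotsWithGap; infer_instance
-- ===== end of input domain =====

-- B replaces A's per-window bit rescans by prefix sums of filled bits (O(1) window-empty
-- test) and a running last-filled index; equivalence is proved on slot lengths p ≥ 1.

-- ===== PORT A =====
-- bit test `loc & (1 << k)`, shared by both ports (Source B writes the same expression);
-- exact for 0 ≤ k (every use inside Pre_); Python raises on k < 0, excluded by Pre_.
def pvBit (loc : Int) (k : Int) : Bool := PySem.Int.band loc (1 <<< k.toNat) != 0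

def checkFreeSlots (location : Int) (start : Int) (stop : Int) : Bool :=
  (PySem.List.pyRange start (stop + 1) 1).foldl
    (fun slotsFree i => slotsFree && !(pvBit location i)) true

def findFreeSlotsWithGap (locations : List Int) (startI : Int) (endI : Int) (p : Int) : List (List Int) :=
  (PySem.List.pyRange 0 (PySem.List.len locations) 1).foldl
    (fun slots i =>
      let loci := PySem.List.pyGetD locations i 0
      -- `for n in range(startI, -1, -1): … break` = first match
      let lastFilledSlot :=
        ((PySem.List.pyRange startI (-1) (-1)).find? (fun n => !(checkFreeSlots loci n n))).getD (-1)
      let previousSlotsFree : Bool := lastFilledSlot != startI - 1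
      ((PySem.List.pyRange startI ((endI - (p - 1)) + 1) 1).foldl
        (fun (st : Int × Bool × List (List Int)) j =>
          let cur := checkFreeSlots loci j (j + (p - 1))
          let lf := if !st.2.1 && cur then j - 1 else st.1
          (lf, cur, if cur then st.2.2 ++ [[i, j, j - lf - 1]] else st.2.2))
        (lastFilledSlot, previousSlotsFree, slots)).2.2)
    []

-- ===== PORT B =====
def findFreeSlotsWithGap_alt (locations : List Int) (startI : Int) (endI : Int) (p : Int) : List (List Int) :=
  let lastJ := endI - p + 1
  (PySem.List.enumerate locations).foldl
    (fun slots il =>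
      let i := il.1
      let loc := il.2
      if startI > lastJ then slots
      else
        -- prefix[k] = number of filled slots among indices 0..k-1 (list + running acc)
        let pr := (PySem.List.pyRange 0 (endI + 1) 1).foldl
          (fun (st : List Int × Int) k =>
            let acc := if pvBit loc k then st.2 + 1 else st.2
            (st.1 ++ [acc], acc)) ([0], 0)
        -- nearest filled slot strictly below startI (or -1)
        let last := (PySem.List.pyRange 0 startI 1).foldl
          (fun last k => if pvBit loc k then k else last) (-1)
        ((PySem.List.pyRange startI (lastJ + 1) 1).foldl
          (fun (st : Int × List (List Int)) j =>
            let last := if decide (j > startI) && pvBit loc (j - 1) then j - 1 else st.1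
            (last,
             if PySem.List.pyGetD pr.1 (j + p) 0 - PySem.List.pyGetD pr.1 j 0 == 0
             then st.2 ++ [[i, j, j - last - 1]] else st.2))
          (last, slots)).2)
    []

-- ===== PRECONDITION & SPEC =====
-- Pre_ excludes (a) p ≤ 0: a nonpositive slot length is outside the natural domain (A then
-- reports every start as a "free slot" with a gap measured against a slot that can lie at or
-- after the start itself), and (b) startI < 0 with a nonempty start range, where A raises
-- ValueError (negative shift count).
def Pre_findFreeSlotsWithGap (locations : List Int) (startI : Int) (endI : Int) (p : Int) : Prop :=
  1 ≤ p ∧ (0 ≤ startI ∨ endI - p + 1 < startI)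
instance (locations : List Int) (startI : Int) (endI : Int) (p : Int) : Decidable (Pre_findFreeSlotsWithGap locations startI endI p) := by unfold Pre_findFreeSlotsWithGap; infer_instance

def pvWitness_findFreeSlotsWithGap : List Int × Int × Int × Int := ([5, 9, 0], 1, 6, 2)

def Spec_findFreeSlotsWithGap (locations : List Int) (startI : Int) (endI : Int) (p : Int) (out : List (List Int)) : Prop := out = findFreeSlotsWithGap_alt locations startI endI p
instance (locations : List Int) (startI : Int) (endI : Int) (p : Int) (out : List (List Int)) : Decidable (Spec_findFreeSlotsWithGap locations startI endI p out) := by unfold Spec_findFreeSlotsWithGap; infer_instance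

-- ===== CLAIM (what is proved, stated in full; the proofs are below) =====
def Claim_equal_findFreeSlotsWithGap : Prop := ∀ (locations : List Int) (startI : Int) (endI : Int) (p : Int), Dom_findFreeSlotsWithGap locations startI endI p → Pre_findFreeSlotsWithGap locations startI endI p → Spec_findFreeSlotsWithGap locations startI endI p (findFreeSlotsWithGap locations startI endI p)

-- ===== LEMMAS AND PROOFS =====

-- window [j, j+p) entirely free
def pvFree (b : Int → Bool) (j p : Int) : Bool := (PySem.List.pyRange j (j + p) 1).all (fun k => !b k)
-- nearest set index strictly below s (-1 if none), computed as B's ascending prescan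
def pvNf (b : Int → Bool) (s : Int) : Int :=
  (PySem.List.pyRange 0 s 1).foldl (fun a k => if b k then k else a) (-1)
-- number of set indices strictly below j
def pvC (b : Int → Bool) (j : Int) : Int := ((PySem.List.pyRange 0 j 1).countP b : Int)

-- canonical forms of the two inner-loop bodies
def pvStepA (b : Int → Bool) (p i : Int) (st : Int × Bool × List (List Int)) (j : Int) :
    Int × Bool × List (List Int) :=
  let cur := pvFree b j p
  let lf := if !st.2.1 && cur then j - 1 else st.1
  (lf, cur, if cur then st.2.2 ++ [[i, j, j - lf - 1]] else st.2.2)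

def pvStepB (b : Int → Bool) (p startI i : Int) (st : Int × List (List Int)) (j : Int) :
    Int × List (List Int) :=
  let last := if decide (j > startI) && b (j - 1) then j - 1 else st.1
  (last, if pvFree b j p then st.2 ++ [[i, j, j - last - 1]] else st.2)

lemma foldl_and_all (l : List Int) (q : Int → Bool) (s : Bool) :
    l.foldl (fun a i => a && q i) s = (s && l.all q) := by
  induction l generalizing s with
  | nil => simp
  | cons x xs ih => simp [List.foldl_cons, ih, Bool.and_assoc]

lemma checkFree_all (loc a c : Int) :
    checkFreeSlots loc a c = (PySem.List.pyRange a (c + 1) 1).all (fun k => !pvBit loc k) := by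
  simp [checkFreeSlots, foldl_and_all]

lemma checkFree_window (loc j p : Int) :
    checkFreeSlots loc j (j + (p - 1)) = pvFree (pvBit loc) j p := by
  have h : j + (p - 1) + 1 = j + p := by ring
  rw [checkFree_all, pvFree, h]

lemma checkFree_single (loc n : Int) : checkFreeSlots loc n n = !pvBit loc n := by
  rw [checkFree_all]
  rw [PySem.List.pyRange_one_singleton n]
  simp

lemma pvNf_succ (b : Int → Bool) (s : Int) (h : 0 ≤ s) :
    pvNf b (s + 1) = if b s then s else pvNf b s := by
  unfold pvNf
  rw [PySem.List.pyRange_one_succ_right h, List.foldl_append]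
  simp

lemma prescan_desc (q : Int → Bool) : ∀ (n : Nat),
    ((PySem.List.pyRange (n : Int) (-1) (-1)).find? q).getD (-1)
      = if q n then (n : Int) else pvNf q n := by
  intro n
  induction n with
  | zero =>
      rw [PySem.List.pyRange_neg_one_cons (by norm_num)]
      rw [PySem.List.pyRange_neg_one_eq_nil (by norm_num)]
      by_cases h : q 0 <;>
        simp [h, pvNf, PySem.List.pyRange_one_eq_nil (by norm_num : (0:Int) ≤ 0), List.find?]
  | succ m ih =>
      have h2 : ((m + 1 : Nat) : Int) = (m : Int) + 1 := by push_cast; ring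
      rw [h2, PySem.List.pyRange_neg_one_cons (by omega)]
      rw [show (m : Int) + 1 - 1 = (m : Int) by ring]
      by_cases h : q ((m : Int) + 1)
      · rw [List.find?_cons_of_pos h]
        simp [h]
      · rw [List.find?_cons_of_neg (by simp [h])]
        rw [ih]
        simp [h, pvNf_succ q m (by positivity)]

lemma prescan_eq (q : Int → Bool) (s : Int) (h : 0 ≤ s) :
    ((PySem.List.pyRange s (-1) (-1)).find? q).getD (-1) = if q s then s else pvNf q s := by
  have := prescan_desc q s.toNat
  rwa [Int.toNat_of_nonneg h] at this

lemma pvC_succ (b : Int → Bool) (s : Int) (h : 0 ≤ s) :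
    pvC b (s + 1) = pvC b s + (if b s then 1 else 0) := by
  unfold pvC
  rw [PySem.List.pyRange_one_succ_right h, List.countP_append]
  by_cases hb : b s <;> simp [List.countP_cons, hb]

lemma prefix_fold (b : Int → Bool) : ∀ (m : Nat),
    ((PySem.List.pyRange 0 (m : Int) 1).foldl
      (fun (st : List Int × Int) k =>
        let acc := if b k then st.2 + 1 else st.2
        (st.1 ++ [acc], acc)) ([0], 0))
    = ((PySem.List.pyRange 0 ((m : Int) + 1) 1).map (fun k => pvC b k), pvC b (m : Int)) := by
  intro m
  induction m with
  | zero =>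
      simp only [Nat.cast_zero]
      rw [PySem.List.pyRange_one_eq_nil (le_refl (0 : Int))]
      rw [PySem.List.pyRange_one_singleton 0]
      simp [pvC, PySem.List.pyRange_one_eq_nil (le_refl (0 : Int))]
  | succ m ih =>
      have h2 : ((m + 1 : Nat) : Int) = (m : Int) + 1 := by push_cast; ring
      rw [h2]
      rw [PySem.List.pyRange_one_succ_right (show (0 : Int) ≤ (m : Int) from by positivity)]
      rw [List.foldl_append, ih]
      rw [PySem.List.pyRange_one_succ_right (show (0 : Int) ≤ (m : Int) + 1 from by positivity)]
      rw [List.map_append]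
      have hC : pvC b ((m : Int) + 1) = if b (m : Int) then pvC b (m : Int) + 1 else pvC b (m : Int) := by
        rw [pvC_succ b m (by positivity)]
        by_cases hb : b (m : Int) <;> simp [hb]
      by_cases hb : b (m : Int) <;> simp [hb, hC]

lemma window_iff (b : Int → Bool) (j p : Int) (h0 : 0 ≤ j) (hp : 1 ≤ p) :
    ((pvC b (j + p) - pvC b j == 0) : Bool) = pvFree b j p := by
  have hsplit : pvC b (j + p) - pvC b j = ((PySem.List.pyRange j (j + p) 1).countP b : Int) := by
    unfold pvC
    rw [PySem.List.pyRange_one_append 0 j (j + p) h0 (by omega), List.countP_append]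
    push_cast
    ring
  rw [hsplit]
  by_cases hf : pvFree b j p = true
  · have hz : (PySem.List.pyRange j (j + p) 1).countP b = 0 :=
      List.countP_eq_zero.mpr (fun a ha => by simpa using List.all_eq_true.mp hf a ha)
    simp [hf, hz]
  · have hnz : (PySem.List.pyRange j (j + p) 1).countP b ≠ 0 := by
      intro hz
      apply hf
      unfold pvFree
      rw [List.all_eq_true]
      intro k hk
      have := List.countP_eq_zero.mp hz k hk
      simpa using this
    have hne : ¬ ((PySem.List.pyRange j (j + p) 1).countP b : Int) = 0 := by exact_mod_cast hnz
    have h1 : (((PySem.List.pyRange j (j + p) 1).countP b : Int) == 0) = false := by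
      rw [beq_eq_false_iff_ne]
      exact hne
    have h2 : pvFree b j p = false := by
      rw [← Bool.not_eq_true]
      exact hf
    rw [h1, h2]

lemma free_not_bit (b : Int → Bool) (j p : Int) (hp : 1 ≤ p) (h : pvFree b j p = true) :
    b j = false := by
  have := (List.all_eq_true.mp h) j (PySem.List.mem_pyRange_one.mpr ⟨le_refl j, by omega⟩)
  simpa using this

lemma notfree_free_bit (b : Int → Bool) (j p : Int) (hp : 1 ≤ p)
    (h1 : ¬ pvFree b j p = true) (h2 : pvFree b (j + 1) p = true) : b j = true := by
  unfold pvFree at h1 h2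
  rw [List.all_eq_true] at h1 h2
  push_neg at h1
  obtain ⟨k, hk, hbk⟩ := h1
  rw [PySem.List.mem_pyRange_one] at hk
  by_cases hkj : k = j
  · subst hkj; simpa using hbk
  · exfalso
    have := h2 k (PySem.List.mem_pyRange_one.mpr ⟨by omega, by omega⟩)
    simp at this
    simp [this] at hbk

lemma loop_eq (b : Int → Bool) (startI p i : Int) (hp : 1 ≤ p) (h0 : 0 ≤ startI) :
    ∀ (t : Nat) (j : Int), startI ≤ j →
    ∀ (lf last : Int) (pf : Bool) (sl : List (List Int)),
    (j = startI → last = pvNf b startI) →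
    (startI < j → last = pvNf b (j - 1)) →
    (pvFree b j p = true → (if pf then lf else j - 1) = pvNf b j) →
    ((PySem.List.pyRange j (j + (t : Int)) 1).foldl (pvStepA b p i) (lf, pf, sl)).2.2
      = ((PySem.List.pyRange j (j + (t : Int)) 1).foldl (pvStepB b p startI i) (last, sl)).2 := by
  intro t
  induction t with
  | zero =>
      intro j hj lf last pf sl hl1 hl2 hinv
      simp
  | succ t ih =>
      intro j hj lf last pf sl hl1 hl2 hinv
      have hcons : PySem.List.pyRange j (j + ((t + 1 : Nat) : Int)) 1
          = j :: PySem.List.pyRange (j + 1) ((j + 1) + (t : Int)) 1 := by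
        rw [PySem.List.pyRange_one_cons (by push_cast; omega)]
        congr 1
        push_cast
        ring
      rw [hcons]
      simp only [List.foldl_cons]
      have hj0 : (0 : Int) ≤ j := le_trans h0 hj
      -- the updated B–side last equals pvNf b j
      have hlast' : (if decide (j > startI) && b (j - 1) then j - 1 else last) = pvNf b j := by
        by_cases hgt : startI < j
        · have hla : last = pvNf b (j - 1) := hl2 hgt
          have hsucc := pvNf_succ b (j - 1) (by omega)
          rw [show j - 1 + 1 = j by ring] at hsucc
          by_cases hb : b (j - 1) <;> simp [hgt, hb, hla, hsucc]
        · have hjeq : j = startI := by omega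
          simp [hl1 hjeq, hjeq]
      -- the updated A–side lastFilledSlot equals pvNf b j whenever the window is free
      have hlfA : pvFree b j p = true →
          (if !pf && pvFree b j p then j - 1 else lf) = pvNf b j := by
        intro hcur
        have := hinv hcur
        by_cases hpf : pf <;> simp [hpf, hcur] <;> simpa [hpf] using this
      have hslots : (pvStepA b p i (lf, pf, sl) j).2.2 = (pvStepB b p startI i (last, sl) j).2 := by
        simp only [pvStepA, pvStepB]
        by_cases hcur : pvFree b j p = true
        · have hA := hlfA hcur
          rw [hlast']
          rw [hcur] at hA ⊢
          simp only [Bool.and_true] at hA ⊢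
          rw [hA]
        · simp [hcur]
      have hstA : pvStepA b p i (lf, pf, sl) j
          = ((pvStepA b p i (lf, pf, sl) j).1, (pvStepA b p i (lf, pf, sl) j).2.1,
             (pvStepA b p i (lf, pf, sl) j).2.2) := rfl
      have hstB : pvStepB b p startI i (last, sl) j
          = ((pvStepB b p startI i (last, sl) j).1, (pvStepA b p i (lf, pf, sl) j).2.2) := by
        rw [hslots]
      rw [hstA, hstB]
      apply ih (j + 1) (by omega)
      · intro h; omega
      · intro _
        show (if decide (j > startI) && b (j - 1) then j - 1 else last) = pvNf b (j + 1 - 1)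
        rw [show j + 1 - 1 = j by ring]
        exact hlast'
      · -- invariant at j + 1
        intro hf1
        show (if pvFree b j p then (if !pf && pvFree b j p then j - 1 else lf) else j + 1 - 1) = pvNf b (j + 1)
        by_cases hcur : pvFree b j p = true
        · have hlf := hlfA hcur
          have hbj : b j = false := free_not_bit b j p hp hcur
          have hsucc := pvNf_succ b j hj0
          rw [hcur] at hlf
          by_cases hpf : pf <;> simp [hcur, hsucc, hbj, hpf] <;> simpa [hpf] using hlf
        · have hbj : b j = true := notfree_free_bit b j p hp hcur hf1
          have hsucc := pvNf_succ b j hj0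
          simp [Bool.not_eq_true] at hcur
          simp [hcur, hsucc, hbj]

lemma perLoc (loc i startI endI p : Int) (hp : 1 ≤ p)
    (hs : 0 ≤ startI ∨ endI - p + 1 < startI) (sl : List (List Int)) :
    (let loci := loc
     let lastFilledSlot :=
       ((PySem.List.pyRange startI (-1) (-1)).find? (fun n => !(checkFreeSlots loci n n))).getD (-1)
     let previousSlotsFree : Bool := lastFilledSlot != startI - 1
     ((PySem.List.pyRange startI ((endI - (p - 1)) + 1) 1).foldl
       (fun (st : Int × Bool × List (List Int)) j =>
         let cur := checkFreeSlots loci j (j + (p - 1))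
         let lf := if !st.2.1 && cur then j - 1 else st.1
         (lf, cur, if cur then st.2.2 ++ [[i, j, j - lf - 1]] else st.2.2))
       (lastFilledSlot, previousSlotsFree, sl)).2.2)
    = (if startI > endI - p + 1 then sl
       else
         let pr := (PySem.List.pyRange 0 (endI + 1) 1).foldl
           (fun (st : List Int × Int) k =>
             let acc := if pvBit loc k then st.2 + 1 else st.2
             (st.1 ++ [acc], acc)) ([0], 0)
         let last := (PySem.List.pyRange 0 startI 1).foldl
           (fun last k => if pvBit loc k then k else last) (-1)
         ((PySem.List.pyRange startI ((endI - p + 1) + 1) 1).foldl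
           (fun (st : Int × List (List Int)) j =>
             let last := if decide (j > startI) && pvBit loc (j - 1) then j - 1 else st.1
             (last,
              if PySem.List.pyGetD pr.1 (j + p) 0 - PySem.List.pyGetD pr.1 j 0 == 0
              then st.2 ++ [[i, j, j - last - 1]] else st.2))
           (last, sl)).2) := by
  by_cases hrange : endI - p + 1 < startI
  · have hnil : PySem.List.pyRange startI ((endI - (p - 1)) + 1) 1 = [] :=
      PySem.List.pyRange_one_eq_nil (by omega)
    simp only [hnil, List.foldl_nil, if_pos (show startI > endI - p + 1 from by omega)]
  · have h0 : 0 ≤ startI := hs.resolve_right hrange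
    have hm : (0 : Int) ≤ endI + 1 := by omega
    rw [if_neg (by omega)]
    show ((PySem.List.pyRange startI ((endI - (p - 1)) + 1) 1).foldl
        (fun (st : Int × Bool × List (List Int)) j =>
          let cur := checkFreeSlots loc j (j + (p - 1))
          let lf := if !st.2.1 && cur then j - 1 else st.1
          (lf, cur, if cur then st.2.2 ++ [[i, j, j - lf - 1]] else st.2.2))
        (((PySem.List.pyRange startI (-1) (-1)).find? (fun n => !(checkFreeSlots loc n n))).getD (-1),
         ((((PySem.List.pyRange startI (-1) (-1)).find? (fun n => !(checkFreeSlots loc n n))).getD (-1)) != startI - 1),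
         sl)).2.2
      = ((PySem.List.pyRange startI ((endI - p + 1) + 1) 1).foldl
        (fun (st : Int × List (List Int)) j =>
          let last := if decide (j > startI) && pvBit loc (j - 1) then j - 1 else st.1
          (last,
           if PySem.List.pyGetD ((PySem.List.pyRange 0 (endI + 1) 1).foldl
           (fun (st : List Int × Int) k =>
             let acc := if pvBit loc k then st.2 + 1 else st.2
             (st.1 ++ [acc], acc)) ([0], 0)).1 (j + p) 0 - PySem.List.pyGetD ((PySem.List.pyRange 0 (endI + 1) 1).foldl
           (fun (st : List Int × Int) k =>
             let acc := if pvBit loc k then st.2 + 1 else st.2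
             (st.1 ++ [acc], acc)) ([0], 0)).1 j 0 == 0
           then st.2 ++ [[i, j, j - last - 1]] else st.2))
        ((PySem.List.pyRange 0 startI 1).foldl (fun last k => if pvBit loc k then k else last) (-1), sl)).2
    have hprefix := prefix_fold (pvBit loc) (endI + 1).toNat
    rw [Int.toNat_of_nonneg hm] at hprefix
    have hpr1 : ((PySem.List.pyRange 0 (endI + 1) 1).foldl
           (fun (st : List Int × Int) k =>
             let acc := if pvBit loc k then st.2 + 1 else st.2
             (st.1 ++ [acc], acc)) ([0], 0)).1 = (PySem.List.pyRange 0 ((endI + 1) + 1) 1).map (fun k => pvC (pvBit loc) k) := by rw [hprefix]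
    rw [hpr1]
    have hfind : (((PySem.List.pyRange startI (-1) (-1)).find? (fun n => !(checkFreeSlots loc n n))).getD (-1)) = if pvBit loc startI then startI else pvNf (pvBit loc) startI := by
      rw [show (fun n => !(checkFreeSlots loc n n)) = fun n => pvBit loc n from by
        funext n; rw [checkFree_single]; simp]
      exact prescan_eq _ _ h0
    rw [hfind]
    rw [show (endI - (p - 1)) + 1 = (endI - p + 1) + 1 from by ring]
    have hA : ∀ (init : Int × Bool × List (List Int)),
        (PySem.List.pyRange startI ((endI - p + 1) + 1) 1).foldl
          (fun (st : Int × Bool × List (List Int)) j =>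
            let cur := checkFreeSlots loc j (j + (p - 1))
            let lf := if !st.2.1 && cur then j - 1 else st.1
            (lf, cur, if cur then st.2.2 ++ [[i, j, j - lf - 1]] else st.2.2)) init
        = (PySem.List.pyRange startI ((endI - p + 1) + 1) 1).foldl (pvStepA (pvBit loc) p i) init := by
      intro init
      apply PySem.List.foldl_congr_mem
      intro acc x _
      simp only [pvStepA, checkFree_window]
    have hB : ∀ (init : Int × List (List Int)),
        (PySem.List.pyRange startI ((endI - p + 1) + 1) 1).foldl
          (fun (st : Int × List (List Int)) j =>
            let last := if decide (j > startI) && pvBit loc (j - 1) then j - 1 else st.1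
            (last,
             if PySem.List.pyGetD ((PySem.List.pyRange 0 ((endI + 1) + 1) 1).map (fun k => pvC (pvBit loc) k)) (j + p) 0 - PySem.List.pyGetD ((PySem.List.pyRange 0 ((endI + 1) + 1) 1).map (fun k => pvC (pvBit loc) k)) j 0 == 0
             then st.2 ++ [[i, j, j - last - 1]] else st.2)) init
        = (PySem.List.pyRange startI ((endI - p + 1) + 1) 1).foldl (pvStepB (pvBit loc) p startI i) init := by
      intro init
      apply PySem.List.foldl_congr_mem
      intro acc x hx
      rw [PySem.List.mem_pyRange_one] at hx
      rw [PySem.List.pyGetD_map_pyRange_of_nonneg _ _ _ _ (by omega) (by omega),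
          PySem.List.pyGetD_map_pyRange_of_nonneg _ _ _ _ (by omega) (by omega),
          window_iff (pvBit loc) x p (by omega) hp]
      rfl
    rw [hA, hB]
    have ht : (endI - p + 1) + 1 = startI + ((((endI - p + 1) + 1 - startI).toNat : Nat) : Int) := by
      rw [Int.toNat_of_nonneg (by omega)]; ring
    rw [ht]
    apply loop_eq (pvBit loc) startI p i hp h0 _ startI le_rfl
    · intro _; rfl
    · intro h; exact absurd h (lt_irrefl _)
    · intro hf
      have hb : pvBit loc startI = false := free_not_bit _ _ _ hp hf
      rw [hb]
      by_cases hq : pvNf (pvBit loc) startI = startI - 1 <;> simp [hq]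


-- ===== VERDICT (by name: the statement is the Claim_ definition above) =====
theorem findFreeSlotsWithGap_spec : Claim_equal_findFreeSlotsWithGap := by
  intro locations startI endI p _ hpre
  unfold Spec_findFreeSlotsWithGap findFreeSlotsWithGap findFreeSlotsWithGap_alt
  rw [PySem.List.enumerate_eq_map_pyRange locations 0, List.foldl_map]
  apply PySem.List.foldl_congr_mem
  intro acc x _
  exact perLoc (PySem.List.pyGetD locations x 0) x startI endI p hpre.1 hpre.2 acc
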